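-- pv_equiv track=rewrite | github.com/PedroAlbqrq/agenda | agenda.py | colocarSemDatasNoFinal
-- ===== SOURCE A (Python) =====
-- def numeroString(string):
--     #CHECA SE UM DIGITO É UM NÚMERO
--     if string >= '0' and string <= '9':
--         return True
--     return False
--
-- def listaDeData(lista):
--     #CRIA UMA LISTA COM A DATA NO FORMATO CERTO [DD,MM,AAAA]
--     lista2 = [int(lista[0]+lista[1]),int(lista[2]+lista[3]),int(lista[4]+lista[5]+lista[6]+lista[7])]
--     return lista2
--
-- def dataValida(string):
--     #CHECA SE UMA STRING É UMA DATA
--     if len(string) != 8: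
--         return False
--     else:
--         lista = []
--         for item in string:
--             lista.append(item)
--     for item in lista:
--         if numeroString(item) == False:
--             return False
--     lista = listaDeData(lista)
--     if lista[0] <= 0 or lista[0] >= 31:
--         return False
--     if lista[1] <= 0 or lista[1] >= 12:
--         return False
--     if lista[0] == 31 and lista[1] == 2 or lista[0] == 31 and lista[1] == 4 or lista[0] == 31 and lista[1] == 6 or lista[0] == 31 and lista[1] == 9 or lista[0] == 31 and lista[1] == 11:
--         return False
--     if lista[0] == 30 and lista[1] == 2:
--         return False
--     return True
--
-- def data(lista):
--   for item in lista:
--     if dataValida(item) == True: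
--       return item
--   return False
--
-- def colocarSemDatasNoFinal(lista):
--     #PEGA UMA LISTA COM LISTAS DE PRIORIDADES SEMLEHANTES [A,A,A]
--     #RETORNA AS QUE TEM DATA NO COMEÇO E AS SEM DATA NO FIM
--     listaFinal = []
--     cont = 0
--     while cont < len(lista):
--         if data(lista[cont][1]) == False:
--             listaFinal.append(lista[cont])
--         else:
--             listaFinal.insert(0,lista[cont])
--         cont += 1
--     return listaFinal
-- ===== SOURCE B (Python) =====
-- def _valida(s):
--     # same date test as A's dataValida: 8 ASCII digits, day 1..30, month 1..11,
--     # and not (day 30, month 2)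
--     if len(s) == 8 and s.isdigit():
--         d, m = int(s[:2]), int(s[2:4])
--         return 1 <= d <= 30 and 1 <= m <= 11 and not (d == 30 and m == 2)
--     return False
--
-- def _tem_data(row):
--     return any(_valida(s) for s in row[1])
--
-- def colocarSemDatasNoFinal(lista):
--     com = [r for r in lista if _tem_data(r)]
--     sem = [r for r in lista if not _tem_data(r)]
--     return com[::-1] + sem
-- ===== Notes on version B (the rewrite author's own statement) =====
-- stated objective: alternative
-- what changed: Replaces the index loop that grows the result by conditional insert(0,...)/append with a partition into dated and undated rows, reversing the dated block once and concatenating; the date test is restated arithmetically instead of via a char-copy loop and list-of-ints helper.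
import Mathlib
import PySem

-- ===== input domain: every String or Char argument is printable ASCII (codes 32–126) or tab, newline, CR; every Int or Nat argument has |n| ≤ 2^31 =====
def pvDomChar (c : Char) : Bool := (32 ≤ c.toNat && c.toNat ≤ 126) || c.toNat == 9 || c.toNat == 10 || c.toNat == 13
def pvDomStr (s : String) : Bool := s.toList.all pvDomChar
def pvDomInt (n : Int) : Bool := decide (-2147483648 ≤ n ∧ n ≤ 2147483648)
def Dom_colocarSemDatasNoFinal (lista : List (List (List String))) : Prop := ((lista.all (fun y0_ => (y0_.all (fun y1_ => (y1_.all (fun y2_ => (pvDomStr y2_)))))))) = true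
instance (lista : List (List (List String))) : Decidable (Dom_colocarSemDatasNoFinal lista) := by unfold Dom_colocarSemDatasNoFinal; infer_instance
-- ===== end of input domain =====

-- B replaces A's insert(0)-based accumulator loop by a partition (dated rows reversed,
-- then undated rows); equivalence is about the return value, on rows of length ≥ 2
-- (shorter rows make both Pythons raise IndexError at row[1]).

-- ===== PORT A =====
def numeroString (c : Char) : Bool :=
  if '0' ≤ c ∧ c ≤ '9' then true else false

-- int(...) here is reached only on all-digit strings (checked by the caller), where ofStr? = some
def listaDeData (l : List Char) : List Int :=
  [(PySem.Int.ofStr? (String.ofList [l.getD 0 ' ', l.getD 1 ' '])).getD 0,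
   (PySem.Int.ofStr? (String.ofList [l.getD 2 ' ', l.getD 3 ' '])).getD 0,
   (PySem.Int.ofStr? (String.ofList [l.getD 4 ' ', l.getD 5 ' ', l.getD 6 ' ', l.getD 7 ' '])).getD 0]

-- dataValida iterates the string's characters; ported over s.toList
def dataValidaL (cs : List Char) : Bool :=
  if cs.length ≠ 8 then false
  else
    -- the for-append loop just copies the string into the list of its characters
    if cs.all numeroString = false then false
    else
      let l2 := listaDeData cs
      if l2.getD 0 0 ≤ 0 ∨ l2.getD 0 0 ≥ 31 then false
      else if l2.getD 1 0 ≤ 0 ∨ l2.getD 1 0 ≥ 12 then false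
      else if (l2.getD 0 0 = 31 ∧ l2.getD 1 0 = 2) ∨ (l2.getD 0 0 = 31 ∧ l2.getD 1 0 = 4) ∨
              (l2.getD 0 0 = 31 ∧ l2.getD 1 0 = 6) ∨ (l2.getD 0 0 = 31 ∧ l2.getD 1 0 = 9) ∨
              (l2.getD 0 0 = 31 ∧ l2.getD 1 0 = 11) then false
      else if l2.getD 0 0 = 30 ∧ l2.getD 1 0 = 2 then false
      else true

def dataValida (s : String) : Bool := dataValidaL s.toList

-- 'data' returns the first valid date or False; ported as Option String (none = False)
def dataA (l : List String) : Option String :=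
  l.find? (fun s => dataValida s == true)

-- the while loop over cont (lista[cont] is always in range, so it walks the list);
-- lista[cont][1] is ported with pyGetD, exact under Pre_ (rows of length ≥ 2)
def aLoop (acc : List (List (List String))) : List (List (List String)) → List (List (List String))
  | [] => acc
  | row :: rest =>
      if dataA (PySem.List.pyGetD row 1 []) = none then aLoop (acc ++ [row]) rest
      else aLoop (row :: acc) rest

def colocarSemDatasNoFinal (lista : List (List (List String))) : List (List (List String)) :=
  aLoop [] lista

-- ===== PORT B =====
-- _valida; int(...) reached only on all-digit strings (guarded), where ofStr? = some;
-- len/isdigit/slices ported over s.toList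
def validaL (cs : List Char) : Bool :=
  if cs.length = 8 ∧ PySem.Chars.strIsdigit cs then
    let d := (PySem.Int.ofStr? (String.ofList (cs.take 2))).getD 0
    let m := (PySem.Int.ofStr? (String.ofList ((cs.drop 2).take 2))).getD 0
    decide (1 ≤ d) && decide (d ≤ 30) && decide (1 ≤ m) && decide (m ≤ 11) &&
      !(decide (d = 30) && decide (m = 2))
  else false

def validaB (s : String) : Bool := validaL s.toList

-- _tem_data; row[1] ported with pyGetD, exact under Pre_
def temData (row : List (List String)) : Bool :=
  (PySem.List.pyGetD row 1 []).any validaB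

def colocarSemDatasNoFinal_alt (lista : List (List (List String))) : List (List (List String)) :=
  let com := lista.filter (fun r => temData r)
  let sem := lista.filter (fun r => !temData r)
  com.reverse ++ sem

-- ===== PRECONDITION & SPEC =====
-- Pre_ excludes only inputs on which A raises (IndexError at lista[cont][1]):
-- every row must have at least two fields.
def Pre_colocarSemDatasNoFinal (lista : List (List (List String))) : Prop :=
  ∀ r ∈ lista, 2 ≤ r.length
instance (lista : List (List (List String))) : Decidable (Pre_colocarSemDatasNoFinal lista) := by
  unfold Pre_colocarSemDatasNoFinal; infer_instance

def pvWitness_colocarSemDatasNoFinal : List (List (List String)) :=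
  [[["tarefa"], ["01012020"]], [["outra"], ["sem data"]]]

def Spec_colocarSemDatasNoFinal (lista : List (List (List String))) (out : List (List (List String))) : Prop := out = colocarSemDatasNoFinal_alt lista
instance (lista : List (List (List String))) (out : List (List (List String))) : Decidable (Spec_colocarSemDatasNoFinal lista out) := by unfold Spec_colocarSemDatasNoFinal; infer_instance

-- ===== CLAIM (what is proved, stated in full; the proofs are below) =====
def Claim_equal_colocarSemDatasNoFinal : Prop := ∀ (lista : List (List (List String))), Dom_colocarSemDatasNoFinal lista → Pre_colocarSemDatasNoFinal lista → Spec_colocarSemDatasNoFinal lista (colocarSemDatasNoFinal lista)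

-- ===== LEMMAS AND PROOFS =====

theorem numeroString_eq (c : Char) : numeroString c = PySem.Chars.isdigit c := by
  by_cases h1 : '0' ≤ c <;> by_cases h2 : c ≤ '9' <;>
    simp [numeroString, PySem.Chars.isdigit, h1, h2]

set_option maxHeartbeats 1000000 in
theorem valida_len8 (a b c d e f g h : Char) :
    dataValidaL [a, b, c, d, e, f, g, h] = validaL [a, b, c, d, e, f, g, h] := by
  by_cases hd : ([a, b, c, d, e, f, g, h].all PySem.Chars.isdigit) = true
  · unfold dataValidaL validaL
    simp only [List.all_cons, List.all_nil, Bool.and_eq_true, Bool.and_true] at hd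
    obtain ⟨ha, hb, hc, hd', he, hf, hg, hh⟩ := hd
    simp only [numeroString_eq, ha, hb, hc, hd', he, hf, hg, hh, List.length_cons,
      List.length_nil, listaDeData, List.getD, List.getElem?_cons_zero,
      List.getElem?_cons_succ, Option.getD_some, List.take_succ_cons, List.take_zero,
      List.drop_succ_cons, List.drop_zero, PySem.Chars.strIsdigit, List.isEmpty_cons,
      List.all_cons, List.all_nil, Bool.and_true]
    norm_num
    rw [Bool.eq_iff_iff]
    simp only [Bool.and_eq_true, Bool.or_eq_true, Bool.not_eq_true', decide_eq_true_eq,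
      decide_eq_false_iff_not]
    omega
  · have hd' : ([a, b, c, d, e, f, g, h].all PySem.Chars.isdigit) = false :=
      Bool.eq_false_iff.mpr hd
    have hL : ([a, b, c, d, e, f, g, h].all numeroString) = false := by
      simp only [List.all_cons, List.all_nil, numeroString_eq] at hd' ⊢; exact hd'
    unfold dataValidaL validaL
    simp [hL, PySem.Chars.strIsdigit, hd']

theorem validaL_eq (cs : List Char) : dataValidaL cs = validaL cs := by
  rcases cs with _|⟨a,_|⟨b,_|⟨c,_|⟨d,_|⟨e,_|⟨f,_|⟨g,_|⟨h,_|⟨i,t⟩⟩⟩⟩⟩⟩⟩⟩⟩ <;>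
    first
      | exact valida_len8 _ _ _ _ _ _ _ _
      | (unfold dataValidaL validaL; simp; try omega)

theorem valida_eq (s : String) : dataValida s = validaB s := validaL_eq s.toList

theorem dataA_none_iff (l : List String) :
    (dataA l = none) = (l.any validaB = false) := by
  simp [dataA, List.find?_eq_none, List.any_eq_false, valida_eq]

theorem aLoop_eq (l : List (List (List String))) (acc : List (List (List String))) :
    aLoop acc l =
      (l.filter (fun r => temData r)).reverse ++ acc ++ l.filter (fun r => !temData r) := by
  induction l generalizing acc with
  | nil => simp [aLoop]
  | cons row rest ih =>
      by_cases hrow : temData row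
      · have hcond : ¬ dataA (PySem.List.pyGetD row 1 []) = none := by
          simp only [dataA_none_iff, temData] at hrow ⊢
          simp [hrow]
        simp [aLoop, hcond, ih, hrow]
      · have hcond : dataA (PySem.List.pyGetD row 1 []) = none := by
          simp only [dataA_none_iff, temData] at hrow ⊢
          simp_all
        simp [aLoop, hcond, ih, hrow]

-- ===== VERDICT (by name: the statement is the Claim_ definition above) =====
theorem colocarSemDatasNoFinal_spec : Claim_equal_colocarSemDatasNoFinal := by
  intro lista _ _
  unfold Spec_colocarSemDatasNoFinal colocarSemDatasNoFinal colocarSemDatasNoFinal_alt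
  rw [aLoop_eq]
  simp
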